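-- pv_equiv track=rewrite | github.com/Kexus/dicenumerator | dice.py | addonelisttomanylists
-- ===== SOURCE A (Python) =====
-- def addonetolist(one, l):
--     return [one + i for i in l]
--
-- def addonelisttomanylists(one, lists):
--     temp1 = [i for i in one]
--     temp2 = []
--     for l in lists:
--         for i in l:
--             temp2 += addonetolist(i, temp1)
--         temp1 = temp2
--         temp2 = []
--     return temp1
-- ===== SOURCE B (Python) =====
-- def addonelisttomanylists(one, lists):
--     total = len(one)
--     for l in lists:
--         total *= len(l)
--     out = []
--     for idx in range(total):
--         r, j = divmod(idx, len(one))
--         acc = one[j]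
--         for l in lists:
--             r, j = divmod(r, len(l))
--             acc = l[j] + acc
--         out.append(acc)
--     return out
-- ===== Notes on version B (the rewrite author's own statement) =====
-- stated objective: alternative
-- what changed: B replaces A's repeated rebuilding of whole intermediate sum lists (temp1/temp2 concatenation per input list) by computing each output position directly via mixed-radix divmod decoding of its index over range(total).
import Mathlib
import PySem

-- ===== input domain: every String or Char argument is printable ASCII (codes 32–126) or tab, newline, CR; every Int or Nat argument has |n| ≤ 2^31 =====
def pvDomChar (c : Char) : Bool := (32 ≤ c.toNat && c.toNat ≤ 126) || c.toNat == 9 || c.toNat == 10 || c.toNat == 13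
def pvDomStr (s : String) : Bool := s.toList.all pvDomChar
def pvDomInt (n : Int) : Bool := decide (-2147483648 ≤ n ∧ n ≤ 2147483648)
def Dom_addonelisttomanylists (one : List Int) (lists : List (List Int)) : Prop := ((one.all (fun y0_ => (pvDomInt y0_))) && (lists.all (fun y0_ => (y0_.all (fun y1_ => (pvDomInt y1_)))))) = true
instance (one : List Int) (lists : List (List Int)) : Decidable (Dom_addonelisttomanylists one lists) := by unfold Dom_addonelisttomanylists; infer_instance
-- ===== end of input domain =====

-- B replaces A's repeated rebuilding of intermediate sum lists by direct mixed-radix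
-- indexing over a single range of the output positions (objective: alternative algorithm).

-- ===== PORT A =====
def addonetolist (one : Int) (l : List Int) : List Int :=
  l.map (fun i => one + i)

def addonelisttomanylists (one : List Int) (lists : List (List Int)) : List Int :=
  let temp1 := one.map (fun i => i)
  (lists.foldl (fun temp1 l =>
      l.foldl (fun temp2 i => temp2 ++ addonetolist i temp1) []) temp1)

-- ===== PORT B =====
-- total = len(one); for l in lists: total *= len(l)
def pvTotal (one : List Int) (lists : List (List Int)) : Int :=
  lists.foldl (fun total l => total * PySem.List.len l) (PySem.List.len one)

-- body of B's per-index loop: divmod decoding, acc built innermost-out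
-- (pyGetD is only evaluated at in-range indices when idx < total)
def pvElem (one : List Int) (lists : List (List Int)) (idx : Int) : Int :=
  (lists.foldl
      (fun (s : Int × Int) l =>
        (PySem.Int.floordiv s.1 (PySem.List.len l),
         PySem.List.pyGetD l (PySem.Int.mod s.1 (PySem.List.len l)) 0 + s.2))
      (PySem.Int.floordiv idx (PySem.List.len one),
       PySem.List.pyGetD one (PySem.Int.mod idx (PySem.List.len one)) 0)).2

def addonelisttomanylists_alt (one : List Int) (lists : List (List Int)) : List Int :=
  (PySem.List.pyRange 0 (pvTotal one lists) 1).map (pvElem one lists)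

-- ===== PRECONDITION & SPEC =====
def Spec_addonelisttomanylists (one : List Int) (lists : List (List Int)) (out : List Int) : Prop := out = addonelisttomanylists_alt one lists
instance (one : List Int) (lists : List (List Int)) (out : List Int) : Decidable (Spec_addonelisttomanylists one lists out) := by unfold Spec_addonelisttomanylists; infer_instance

-- ===== CLAIM (what is proved, stated in full; the proofs are below) =====
def Claim_equal_addonelisttomanylists : Prop := ∀ (one : List Int) (lists : List (List Int)), Dom_addonelisttomanylists one lists → Spec_addonelisttomanylists one lists (addonelisttomanylists one lists)

-- ===== LEMMAS AND PROOFS =====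

-- one merged stage: element m of the product of `cur` with one input list `l`
def pvMerge (cur l : List Int) : List Int :=
  (List.range (l.length * cur.length)).map
    (fun m => l.getD (m / cur.length) 0 + cur.getD (m % cur.length) 0)

-- Nat-valued version of B's per-index loop state
def pvElemN (one : List Int) (lists : List (List Int)) (k : Nat) : Int :=
  (lists.foldl
      (fun (s : Nat × Int) l => (s.1 / l.length, l.getD (s.1 % l.length) 0 + s.2))
      (k / one.length, one.getD (k % one.length) 0)).2

lemma pvFold_cast (lists : List (List Int)) (r : Nat) (acc : Int) :
    lists.foldl
      (fun (s : Int × Int) l =>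
        (PySem.Int.floordiv s.1 (PySem.List.len l),
         PySem.List.pyGetD l (PySem.Int.mod s.1 (PySem.List.len l)) 0 + s.2))
      ((r : Int), acc)
    = (fun p : Nat × Int => ((p.1 : Int), p.2))
        (lists.foldl
          (fun (s : Nat × Int) l => (s.1 / l.length, l.getD (s.1 % l.length) 0 + s.2))
          (r, acc)) := by
  induction lists generalizing r acc with
  | nil => rfl
  | cons l rest ih =>
      simp only [List.foldl_cons, PySem.List.len_eq, PySem.Int.floordiv_natCast,
        PySem.Int.mod_natCast, PySem.List.pyGetD_natCast]
      exact ih _ _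

lemma pvElem_natCast (one : List Int) (lists : List (List Int)) (k : Nat) :
    pvElem one lists (k : Int) = pvElemN one lists k := by
  unfold pvElem pvElemN
  rw [show PySem.Int.floordiv (k : Int) (PySem.List.len one) = ((k / one.length : Nat) : Int) from by simp,
     show PySem.List.pyGetD one (PySem.Int.mod (k : Int) (PySem.List.len one)) 0 = one.getD (k % one.length) 0 from by
       rw [PySem.List.len_eq, PySem.Int.mod_natCast, PySem.List.pyGetD_natCast],
     pvFold_cast]

lemma map_getD_range (xs : List Int) : (List.range xs.length).map (fun m => xs.getD m 0) = xs := by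
  apply List.ext_getElem
  · simp
  · intro i h1 h2; simp [h2]

lemma stepA_eq_merge (cur l : List Int) :
    l.foldl (fun temp2 i => temp2 ++ addonetolist i cur) [] = pvMerge cur l := by
  rw [PySem.List.foldl_append_eq_flatMap, List.nil_append]
  induction l with
  | nil => simp [pvMerge]
  | cons x l' ih =>
      by_cases hc : cur.length = 0
      · have : cur = [] := List.length_eq_zero_iff.mp hc
        subst this; simp [pvMerge, addonetolist]
      · have hn : 0 < cur.length := Nat.pos_of_ne_zero hc
        unfold pvMerge
        rw [show (x :: l').length * cur.length = cur.length + l'.length * cur.length by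
              simp [List.length_cons]; ring]
        rw [List.range_add, List.map_append, List.map_map, List.flatMap_cons]
        congr 1
        · calc addonetolist x cur
              = ((List.range cur.length).map (fun m => cur.getD m 0)).map (fun j => x + j) := by
                rw [map_getD_range]; rfl
            _ = (List.range cur.length).map (fun m => x + cur.getD m 0) := by rw [List.map_map]; rfl
            _ = _ := by
                apply List.map_congr_left
                intro m hm
                have hmlt : m < cur.length := List.mem_range.mp hm
                simp [Nat.div_eq_of_lt hmlt, Nat.mod_eq_of_lt hmlt]
        · rw [ih]
          unfold pvMerge
          apply List.map_congr_left
          intro m hm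
          simp only [Function.comp_apply]
          rw [show cur.length + m = m + cur.length by ring,
              Nat.add_div_right _ hn, Nat.add_mod_right]
          simp

lemma pvTotal_cast (lists : List (List Int)) (s : Nat) :
    lists.foldl (fun total l => total * PySem.List.len l) (s : Int)
      = ((s * (lists.map List.length).prod : Nat) : Int) := by
  induction lists generalizing s with
  | nil => simp
  | cons l rest ih =>
      rw [List.foldl_cons,
          show ((s : Int) * PySem.List.len l) = ((s * l.length : Nat) : Int) by
            rw [PySem.List.len_eq]; push_cast; ring,
          ih]
      congr 1
      simp [Nat.mul_assoc]

lemma pvTotal_eq (one : List Int) (lists : List (List Int)) :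
    pvTotal one lists = ((one.length * (lists.map List.length).prod : Nat) : Int) := by
  unfold pvTotal
  rw [PySem.List.len_eq, pvTotal_cast]

lemma length_pvMerge (cur l : List Int) : (pvMerge cur l).length = l.length * cur.length := by
  simp [pvMerge]

lemma getD_pvMerge (cur l : List Int) (j : Nat) (hj : j < l.length * cur.length) :
    (pvMerge cur l).getD j 0 = l.getD (j / cur.length) 0 + cur.getD (j % cur.length) 0 := by
  unfold pvMerge
  rw [List.getD_eq_getElem _ _ (by simpa using hj)]
  simp

lemma elemN_step (one l : List Int) (rest : List (List Int)) (k : Nat)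
    (hn : 0 < one.length) (hm : 0 < l.length) :
    pvElemN one (l :: rest) k = pvElemN (pvMerge one l) rest k := by
  unfold pvElemN
  simp only [List.foldl_cons]
  have hj : k % (l.length * one.length) < l.length * one.length :=
    Nat.mod_lt _ (Nat.mul_pos hm hn)
  have h1 : k / one.length / l.length = k / (l.length * one.length) := by
    rw [Nat.div_div_eq_div_mul, Nat.mul_comm]
  have h2 : k % (l.length * one.length) / one.length = k / one.length % l.length := by
    rw [Nat.mul_comm, Nat.mod_mul_right_div_self]
  have h3 : k % (l.length * one.length) % one.length = k % one.length := by
    rw [Nat.mul_comm]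
    exact Nat.mod_mod_of_dvd k (dvd_mul_right _ _)
  rw [length_pvMerge, getD_pvMerge one l _ hj, h1, h2, h3]

lemma alt_eq_fold_merge (lists : List (List Int)) : ∀ (one : List Int),
    addonelisttomanylists_alt one lists = lists.foldl pvMerge one := by
  induction lists with
  | nil =>
      intro one
      unfold addonelisttomanylists_alt pvTotal
      simp only [List.foldl_nil, PySem.List.len_eq]
      rw [PySem.List.pyRange_zero_natCast, List.map_map]
      calc (List.range one.length).map ((pvElem one []) ∘ (fun k : Nat => (k : Int)))
          = (List.range one.length).map (fun m => one.getD m 0) := by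
            apply List.map_congr_left
            intro k hk
            have hk' : k < one.length := List.mem_range.mp hk
            simp only [Function.comp_apply]
            rw [pvElem_natCast]
            unfold pvElemN
            simp [Nat.mod_eq_of_lt hk']
        _ = one := map_getD_range one
  | cons l rest ih =>
      intro one
      rw [List.foldl_cons, ← ih (pvMerge one l)]
      unfold addonelisttomanylists_alt
      have htot : pvTotal one (l :: rest) = pvTotal (pvMerge one l) rest := by
        rw [pvTotal_eq, pvTotal_eq, length_pvMerge]
        congr 1
        simp [List.map_cons]; ring
      rw [htot, pvTotal_eq]
      apply List.map_congr_left
      intro idx hidx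
      rw [PySem.List.pyRange_zero_natCast] at hidx
      rcases List.mem_map.mp hidx with ⟨k, hk, rfl⟩
      have hkT : k < (pvMerge one l).length * (rest.map List.length).prod := by
        simpa using List.mem_range.mp hk
      rw [pvElem_natCast, pvElem_natCast]
      have hpos : (pvMerge one l).length ≠ 0 := by
        intro h; rw [h] at hkT; omega
      rw [length_pvMerge] at hpos
      rcases Nat.mul_ne_zero_iff.mp hpos with ⟨h1, h2⟩
      exact elemN_step one l rest k (Nat.pos_of_ne_zero h2) (Nat.pos_of_ne_zero h1)

-- ===== VERDICT (by name: the statement is the Claim_ definition above) =====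
theorem addonelisttomanylists_spec : Claim_equal_addonelisttomanylists := by
  intro one lists _
  unfold Spec_addonelisttomanylists addonelisttomanylists
  rw [alt_eq_fold_merge]
  simp only [stepA_eq_merge, List.map_id']
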